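-- pv_equiv track=rewrite | github.com/AliceFermigier/MA_analysis | MA_analysis.py | gen_delete_list
-- ===== SOURCE A (Python) =====
-- def gen_delete_list(diff):
--     delete_list = []
--     idx = 0
--     while idx < len(diff):
--         if abs(diff[idx]) > 4000:
--             head = idx + 1
--             tail = min(idx + 332, len(diff))
--             delete_list += range(head, tail)
--             idx = tail
--         idx += 1
--
--     return delete_list
-- ===== SOURCE B (Python) =====
-- def gen_delete_list(diff):
--     n = len(diff)
--     bigs = [i for i in range(n) if abs(diff[i]) > 4000]
--     out = []
--     j = 0
--     while j < len(bigs):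
--         i = bigs[j]
--         tail = min(i + 332, n)
--         out.extend(range(i + 1, tail))
--         while j < len(bigs) and bigs[j] <= tail:
--             j += 1
--     return out
-- ===== Notes on version B (the rewrite author's own statement) =====
-- stated objective: alternative
-- what changed: Replaces A's single jumping while-loop over all indices by a two-pass approach: first collect the indices with |diff[i]| > 4000, then walk that candidate list with a pointer, emitting each window and skipping candidates <= tail.
import Mathlib
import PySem

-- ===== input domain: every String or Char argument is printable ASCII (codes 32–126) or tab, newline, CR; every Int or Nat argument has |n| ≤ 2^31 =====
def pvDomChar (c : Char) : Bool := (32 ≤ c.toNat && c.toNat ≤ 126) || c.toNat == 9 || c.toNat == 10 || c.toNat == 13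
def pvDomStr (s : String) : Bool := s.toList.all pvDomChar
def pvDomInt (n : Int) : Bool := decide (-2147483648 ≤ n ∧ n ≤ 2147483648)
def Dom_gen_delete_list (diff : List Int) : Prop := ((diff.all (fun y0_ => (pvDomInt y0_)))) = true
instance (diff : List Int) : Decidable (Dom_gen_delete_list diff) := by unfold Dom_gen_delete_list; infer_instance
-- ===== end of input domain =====

-- B re-implements A's jumping while-loop as a two-pass algorithm (collect candidate indices, then walk them with a pointer); alternative decomposition, same cost.


-- ===== PORT A =====
-- A's while-loop: idx scans; on a big diff it appends range(idx+1, tail) and jumps to tail+1.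
def gdlLoopA (diff : List Int) (idx : Nat) (acc : List Int) : List Int :=
  if h : idx < diff.length then
    if 4000 < (diff.getD idx 0).natAbs then
      gdlLoopA diff (min (idx + 332) diff.length + 1)
        (acc ++ PySem.List.pyRange ((idx : Int) + 1) ((min (idx + 332) diff.length : Nat) : Int) 1)
    else gdlLoopA diff (idx + 1) acc
  else acc
termination_by diff.length - idx
decreasing_by · omega
              · omega

def gen_delete_list (diff : List Int) : List Int := gdlLoopA diff 0 []

-- ===== PORT B =====
-- B pass 1: the candidate indices i with |diff[i]| > 4000, in increasing order.
def gdlBigs (diff : List Int) : List Nat :=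
  (List.range diff.length).filter (fun i => decide (4000 < (diff.getD i 0).natAbs))

-- B pass 2: walk the candidate list; emit each window, then skip candidates ≤ tail.
-- (Python's inner while starts at the current candidate i; since i ≤ tail it always drops
-- i itself first, which here is the consumed head, so the dropWhile runs on the rest.)
def gdlLoopB (n : Nat) (bs : List Nat) (acc : List Int) : List Int :=
  match bs with
  | [] => acc
  | i :: rest =>
      gdlLoopB n (rest.dropWhile (fun j => decide (j ≤ min (i + 332) n)))
        (acc ++ PySem.List.pyRange ((i : Int) + 1) ((min (i + 332) n : Nat) : Int) 1)
termination_by bs.length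
decreasing_by
  exact lt_of_le_of_lt (List.length_dropWhile_le _ _) (by simp)

def gen_delete_list_alt (diff : List Int) : List Int :=
  gdlLoopB diff.length (gdlBigs diff) []

-- ===== PRECONDITION & SPEC =====
def Spec_gen_delete_list (diff : List Int) (out : List Int) : Prop := out = gen_delete_list_alt diff
instance (diff : List Int) (out : List Int) : Decidable (Spec_gen_delete_list diff out) := by unfold Spec_gen_delete_list; infer_instance

-- ===== CLAIM (what is proved, stated in full; the proofs are below) =====
def Claim_equal_gen_delete_list : Prop := ∀ (diff : List Int), Dom_gen_delete_list diff → Spec_gen_delete_list diff (gen_delete_list diff)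

-- ===== LEMMAS AND PROOFS =====

-- the candidates at positions ≥ m
def gdlBigsFrom (diff : List Int) (m : Nat) : List Nat :=
  (List.range' m (diff.length - m)).filter (fun i => decide (4000 < (diff.getD i 0).natAbs))

theorem dropWhile_eq_self_of (p : Nat → Bool) (l : List Nat) (h : ∀ x ∈ l, ¬ p x) :
    l.dropWhile p = l := by
  cases l with
  | nil => rfl
  | cons a t => simp [List.dropWhile, h a (by simp)]

-- skipping the candidates ≤ t from position m yields exactly the candidates from position t+1
theorem dropWhile_bigsFrom (diff : List Int) (t : Nat) :
    ∀ m, m ≤ t + 1 →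
      (gdlBigsFrom diff m).dropWhile (fun j => decide (j ≤ t)) = gdlBigsFrom diff (t + 1) := by
  intro m hm
  induction hd : t + 1 - m generalizing m with
  | zero =>
      have hmt : m = t + 1 := by omega
      subst hmt
      apply dropWhile_eq_self_of
      intro x hx
      have : x ∈ List.range' (t + 1) (diff.length - (t + 1)) := List.mem_of_mem_filter hx
      have := List.mem_range'.mp this
      simp; omega
  | succ k ih =>
      have hmt : m ≤ t := by omega
      unfold gdlBigsFrom
      by_cases hlen : m < diff.length
      · have hr : List.range' m (diff.length - m) = m :: List.range' (m + 1) (diff.length - (m + 1)) := by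
          have : diff.length - m = (diff.length - (m + 1)) + 1 := by omega
          rw [this, List.range'_succ]
        rw [hr]
        by_cases hp : 4000 < (diff.getD m 0).natAbs
        · simp only [List.filter_cons, hp, decide_true, if_true]
          rw [List.dropWhile_cons_of_pos (by simp [hmt])]
          exact ih (m + 1) (by omega) (by omega)
        · simp only [List.filter_cons, decide_eq_false hp, Bool.false_eq_true, if_false]
          exact ih (m + 1) (by omega) (by omega)
      · have h0 : diff.length - m = 0 := by omega
        have h1 : diff.length - (t + 1) = 0 := by omega
        simp [h0, h1]

-- main invariant: A's loop at index idx equals B's loop on the candidates ≥ idx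
theorem loopA_eq_loopB (diff : List Int) :
    ∀ idx acc, gdlLoopA diff idx acc = gdlLoopB diff.length (gdlBigsFrom diff idx) acc := by
  intro idx
  induction hd : diff.length - idx using Nat.strong_induction_on generalizing idx with
  | _ d ih =>
  intro acc
  rw [gdlLoopA]
  by_cases h : idx < diff.length
  · simp only [h, dif_pos]
    have hr : List.range' idx (diff.length - idx) = idx :: List.range' (idx + 1) (diff.length - (idx + 1)) := by
      have : diff.length - idx = (diff.length - (idx + 1)) + 1 := by omega
      rw [this, List.range'_succ]
    by_cases hp : 4000 < (diff.getD idx 0).natAbs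
    · simp only [hp, if_true]
      rw [ih (diff.length - (min (idx + 332) diff.length + 1)) (by omega) _ rfl]
      unfold gdlBigsFrom
      rw [hr]
      simp only [List.filter_cons, decide_eq_true hp, if_true]
      simp only [gdlLoopB]
      congr 1
      exact (dropWhile_bigsFrom diff (min (idx + 332) diff.length) (idx + 1) (by omega)).symm
    · simp only [hp, if_false]
      rw [ih (diff.length - (idx + 1)) (by omega) _ rfl]
      unfold gdlBigsFrom
      rw [hr]
      simp only [List.filter_cons, decide_eq_false hp, Bool.false_eq_true, if_false]
  · simp only [h, dif_neg, not_false_iff]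
    have h0 : diff.length - idx = 0 := by omega
    unfold gdlBigsFrom
    rw [h0]
    simp only [List.range'_zero, List.filter_nil, gdlLoopB]

theorem bigs_eq_bigsFrom_zero (diff : List Int) : gdlBigs diff = gdlBigsFrom diff 0 := by
  unfold gdlBigs gdlBigsFrom
  rw [List.range_eq_range']
  simp

-- ===== VERDICT (by name: the statement is the Claim_ definition above) =====
theorem gen_delete_list_spec : Claim_equal_gen_delete_list := by
  intro diff _
  unfold Spec_gen_delete_list gen_delete_list gen_delete_list_alt
  rw [loopA_eq_loopB, bigs_eq_bigsFrom_zero]
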